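-- pv_equiv track=rewrite | github.com/sloproo/advent_of_code_2022 | 12/apu.py | luo_alueet
-- ===== SOURCE A (Python) =====
-- def kirjain_ruudussa(koordinaatit: tuple, kartta:list) -> str:
--     return kartta[koordinaatit[0]][koordinaatit[1]]
--
-- def rajoissa(koordinaatit: tuple, kartta: list) -> bool:
--     y, x = koordinaatit
--     if y < 0 or y >= len(kartta):
--         return False
--     elif x < 0 or x >= len(kartta[y]):
--         return False
--     else:
--         return True
--
-- def ruudun_naapurit(koordinaatit: tuple, kartta: list) -> list:
--     palautettavat = []
--     for ruutu in [(koordinaatit[0]+1, koordinaatit[1]), (koordinaatit[0]-1, koordinaatit[1]),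
--                     (koordinaatit[0], koordinaatit[1]+1), (koordinaatit[0], koordinaatit[1]-1)]:
--         if rajoissa(ruutu, kartta):
--             palautettavat.append(ruutu)
--     return palautettavat
--
-- def alue_ruudusta(koordinaatit: tuple, kartta: list) -> list:
--     alue = [koordinaatit]
--     kirjain = kirjain_ruudussa(koordinaatit, kartta)
--     while True:
--         vanha_pituus = len(alue)
--         for vanhan_koordinaatit in alue:
--             for naapuri in ruudun_naapurit(vanhan_koordinaatit, kartta):
--                 if naapuri in alue:
--                     continue
--                 elif kirjain_ruudussa(naapuri, kartta) != kirjain: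
--                     continue
--                 else:
--                     alue.append(naapuri)
--         if vanha_pituus == len(alue):
--             break
--     return alue
--
-- def luo_alueet(kartta: list) -> list:
--     palautettavat_alueet = []
--     for y in range(len(kartta)):
--         for x in range(len(kartta[y])):
--             for alue in palautettavat_alueet:
--                 if (y, x) in alue:
--                     break
--             else:
--                 palautettavat_alueet.append(alue_ruudusta((y, x), kartta))
--     return palautettavat_alueet
-- ===== SOURCE B (Python) =====
-- def luo_alueet(kartta: list) -> list:
--     palautettavat_alueet = []
--     varatut = set()
--     for y in range(len(kartta)):
--         for x in range(len(kartta[y])):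
--             if (y, x) in varatut:
--                 continue
--             kirjain = kartta[y][x]
--             alue = [(y, x)]
--             nahdyt = {(y, x)}
--             i = 0
--             while i < len(alue):
--                 cy, cx = alue[i]
--                 i += 1
--                 for naapuri in ((cy + 1, cx), (cy - 1, cx), (cy, cx + 1), (cy, cx - 1)):
--                     if naapuri in nahdyt:
--                         continue
--                     ny, nx = naapuri
--                     if 0 <= ny < len(kartta) and 0 <= nx < len(kartta[ny]) and kartta[ny][nx] == kirjain:
--                         nahdyt.add(naapuri)
--                         alue.append(naapuri)
--             varatut |= nahdyt
--             palautettavat_alueet.append(alue)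
--     return palautettavat_alueet
-- ===== Notes on version B (the rewrite author's own statement) =====
-- stated objective: faster
-- what changed: A grows each region by repeated full passes with linear list-membership tests and re-scans all previous regions for every cell; B does a single-pass BFS flood fill per region with a per-region hash set and a global set of assigned cells, same neighbour order, so every membership test is O(1) and each cell is processed once.
import Mathlib
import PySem

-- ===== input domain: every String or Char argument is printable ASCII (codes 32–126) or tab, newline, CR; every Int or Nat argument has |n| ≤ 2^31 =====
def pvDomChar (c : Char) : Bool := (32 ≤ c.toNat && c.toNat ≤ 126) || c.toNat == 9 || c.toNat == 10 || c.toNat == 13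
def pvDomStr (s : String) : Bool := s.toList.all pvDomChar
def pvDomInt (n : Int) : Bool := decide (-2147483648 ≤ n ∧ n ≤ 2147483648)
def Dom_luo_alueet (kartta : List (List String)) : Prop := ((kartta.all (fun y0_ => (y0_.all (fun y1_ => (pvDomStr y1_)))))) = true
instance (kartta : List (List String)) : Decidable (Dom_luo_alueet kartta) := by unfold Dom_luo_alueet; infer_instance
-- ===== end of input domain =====

-- B replaces A's multi-pass fixed-point region growth (with linear list membership and a scan
-- over all previous regions per cell) by a one-pass BFS flood fill with a per-region set and a
-- global set of assigned cells, same neighbour order; a timing run measured it faster.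
-- The list of all in-bounds coordinates; used only to bound the recursion of both ports
-- (the guards it appears in are totality devices that provably always hold at runtime).
def pvCoords (kartta : List (List String)) : List (Int × Int) :=
  (List.range kartta.length).flatMap
    (fun y => (List.range (kartta.getD y []).length).map (fun (x : Nat) => ((y : Int), (x : Int))))

-- ===== PORT A =====
def kirjainRuudussa (koordinaatit : Int × Int) (kartta : List (List String)) : Option String :=
  (PySem.List.pyGet? kartta koordinaatit.1).bind (fun rivi => PySem.List.pyGet? rivi koordinaatit.2)

def rajoissa (koordinaatit : Int × Int) (kartta : List (List String)) : Bool :=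
  if koordinaatit.1 < 0 ∨ (kartta.length : Int) ≤ koordinaatit.1 then false
  else if koordinaatit.2 < 0 ∨
      ((((PySem.List.pyGet? kartta koordinaatit.1).getD []).length : Int) ≤ koordinaatit.2) then false
  else true

def ruudunNaapurit (koordinaatit : Int × Int) (kartta : List (List String)) : List (Int × Int) :=
  [(koordinaatit.1 + 1, koordinaatit.2), (koordinaatit.1 - 1, koordinaatit.2),
   (koordinaatit.1, koordinaatit.2 + 1), (koordinaatit.1, koordinaatit.2 - 1)].filter
    (fun ruutu => rajoissa ruutu kartta)

-- the inner 'for vanhan_koordinaatit in alue' loop of alue_ruudusta: Python iterates by index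
-- and sees the elements appended during iteration
def alueForA (kartta : List (List String)) (kirjain : Option String)
    (alue : List (Int × Int)) (i : Nat) : List (Int × Int) :=
  if h : i < alue.length ∧ alue.Nodup ∧ ∀ p ∈ alue, p ∈ pvCoords kartta then
    let vk := alue.getD i (0, 0)
    let alue' := (ruudunNaapurit vk kartta).foldl
      (fun acc naapuri =>
        if naapuri ∈ acc then acc
        else if kirjainRuudussa naapuri kartta ≠ kirjain then acc
        else acc ++ [naapuri]) alue
    alueForA kartta kirjain alue' (i + 1)
  else alue
termination_by (pvCoords kartta).length - i
decreasing_by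
  have hle : alue.length ≤ (pvCoords kartta).length :=
    (h.2.1.subperm (fun p hp => h.2.2 p hp)).length_le
  omega

-- the 'while True' loop of alue_ruudusta
def alueWhileA (kartta : List (List String)) (kirjain : Option String)
    (alue : List (Int × Int)) : List (Int × Int) :=
  let vanha_pituus := alue.length
  let alue' := alueForA kartta kirjain alue 0
  if vanha_pituus = alue'.length then alue'
  else if h : alue.length < alue'.length ∧ alue'.Nodup ∧ ∀ p ∈ alue', p ∈ pvCoords kartta then
    alueWhileA kartta kirjain alue'
  else alue'
termination_by (pvCoords kartta).length + 1 - alue.length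
decreasing_by
  have hle : alue'.length ≤ (pvCoords kartta).length :=
    (h.2.1.subperm (fun p hp => h.2.2 p hp)).length_le
  have he : alue'.length = (alueForA kartta kirjain alue 0).length := rfl
  omega

def alueRuudusta (koordinaatit : Int × Int) (kartta : List (List String)) : List (Int × Int) :=
  alueWhileA kartta (kirjainRuudussa koordinaatit kartta) [koordinaatit]

def luo_alueet (kartta : List (List String)) : List (List (Int × Int)) :=
  (List.range kartta.length).foldl (fun palautettavat y =>
    (List.range (kartta.getD y []).length).foldl (fun palautettavat (x : Nat) =>
      if palautettavat.any (fun alue => decide (((y : Int), (x : Int)) ∈ alue)) then palautettavat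
      else palautettavat ++ [alueRuudusta ((y : Int), (x : Int)) kartta]) palautettavat) []

-- ===== PORT B =====
def ruutuB (kartta : List (List String)) (y x : Int) : Option String :=
  (PySem.List.pyGet? kartta y).bind (fun rivi => PySem.List.pyGet? rivi x)

-- the 'while i < len(alue)' BFS loop of B, with its set of seen cells
def bfsB (kartta : List (List String)) (kirjain : Option String)
    (alue : List (Int × Int)) (nahdyt : PySem.Set (Int × Int)) (i : Nat) :
    List (Int × Int) × PySem.Set (Int × Int) :=
  if h : i < alue.length ∧ alue.Nodup ∧ ∀ p ∈ alue, p ∈ pvCoords kartta then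
    let c := alue.getD i (0, 0)
    let st := [(c.1 + 1, c.2), (c.1 - 1, c.2), (c.1, c.2 + 1), (c.1, c.2 - 1)].foldl
      (fun (st : List (Int × Int) × PySem.Set (Int × Int)) naapuri =>
        if naapuri ∈ st.2 then st
        else if 0 ≤ naapuri.1 ∧ naapuri.1 < (kartta.length : Int) ∧ 0 ≤ naapuri.2 ∧
            naapuri.2 < (((PySem.List.pyGet? kartta naapuri.1).getD []).length : Int) ∧
            ruutuB kartta naapuri.1 naapuri.2 = kirjain then
          (st.1 ++ [naapuri], PySem.Set.add st.2 naapuri)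
        else st) (alue, nahdyt)
    bfsB kartta kirjain st.1 st.2 (i + 1)
  else (alue, nahdyt)
termination_by (pvCoords kartta).length - i
decreasing_by
  have hle : alue.length ≤ (pvCoords kartta).length :=
    (h.2.1.subperm (fun p hp => h.2.2 p hp)).length_le
  omega

def luo_alueet_alt (kartta : List (List String)) : List (List (Int × Int)) :=
  ((List.range kartta.length).foldl
    (fun (st : List (List (Int × Int)) × PySem.Set (Int × Int)) y =>
      (List.range (kartta.getD y []).length).foldl (fun st (x : Nat) =>
        if ((y : Int), (x : Int)) ∈ st.2 then st
        else
          let kirjain := ruutuB kartta (y : Int) (x : Int)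
          let r := bfsB kartta kirjain [((y : Int), (x : Int))]
            (PySem.Set.ofList [((y : Int), (x : Int))]) 0
          (st.1 ++ [r.1], PySem.Set.union st.2 r.2)) st)
    ([], PySem.Set.empty)).1

-- ===== PRECONDITION & SPEC =====
def Spec_luo_alueet (kartta : List (List String)) (out : List (List (Int × Int))) : Prop := out = luo_alueet_alt kartta
instance (kartta : List (List String)) (out : List (List (Int × Int))) : Decidable (Spec_luo_alueet kartta out) := by unfold Spec_luo_alueet; infer_instance

-- ===== CLAIM (what is proved, stated in full; the proofs are below) =====
def Claim_equal_luo_alueet : Prop := ∀ (kartta : List (List String)), Dom_luo_alueet kartta → Spec_luo_alueet kartta (luo_alueet kartta)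

-- ===== LEMMAS AND PROOFS =====

-- membership in pvCoords is exactly rajoissa
lemma mem_pvCoords_iff (kartta : List (List String)) (p : Int × Int) :
    p ∈ pvCoords kartta ↔ rajoissa p kartta = true := by
  obtain ⟨py, px⟩ := p
  simp [pvCoords, rajoissa]
  constructor
  · rintro ⟨y, hy, x, hx, rfl, rfl⟩
    rw [PySem.List.pyGet?_natCast]
    omega
  · rintro ⟨⟨h1, h2⟩, h3, h4⟩
    rw [show py = ((py.toNat : Nat) : Int) by omega, PySem.List.pyGet?_natCast] at h4
    exact ⟨py.toNat, by omega, px.toNat, by omega, by omega, by omega⟩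

-- the body of A's neighbour loop, named for the lemmas (definitionally the lambda in alueForA)
def stepA (kartta : List (List String)) (kirjain : Option String)
    (acc : List (Int × Int)) (naapuri : Int × Int) : List (Int × Int) :=
  if naapuri ∈ acc then acc
  else if kirjainRuudussa naapuri kartta ≠ kirjain then acc
  else acc ++ [naapuri]

lemma foldA_all (kartta : List (List String)) (kirjain : Option String) :
    ∀ (ns acc : List (Int × Int)),
    acc <+: ns.foldl (stepA kartta kirjain) acc ∧
    (acc.Nodup → (ns.foldl (stepA kartta kirjain) acc).Nodup) ∧
    (∀ p ∈ ns.foldl (stepA kartta kirjain) acc, p ∈ acc ∨ p ∈ ns) ∧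
    (∀ n ∈ ns, kirjainRuudussa n kartta = kirjain → n ∈ ns.foldl (stepA kartta kirjain) acc) := by
  intro ns
  induction ns with
  | nil => simp
  | cons n t ih =>
    intro acc
    obtain ⟨ihp, ihn, ihs, ihc⟩ := ih (stepA kartta kirjain acc n)
    have hpre : acc <+: stepA kartta kirjain acc n := by
      unfold stepA; split_ifs <;> simp
    have hmem : ∀ p ∈ stepA kartta kirjain acc n, p ∈ acc ∨ p = n := by
      intro p hp
      unfold stepA at hp; split_ifs at hp <;> simp_all
    have hnd : acc.Nodup → (stepA kartta kirjain acc n).Nodup := by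
      intro h
      unfold stepA; split_ifs with h1 h2
      · exact h
      · exact h
      · simp only [List.nodup_append, List.nodup_cons, List.nodup_nil, and_true]
        refine ⟨h, by simp, ?_⟩
        intro a ha b hb
        simp only [List.mem_singleton] at hb
        subst hb
        exact ne_of_mem_of_not_mem ha h1
    refine ⟨hpre.trans ihp, fun h => ihn (hnd h), ?_, ?_⟩
    · intro p hp
      rcases ihs p hp with h | h
      · rcases hmem p h with h' | h' <;> simp [h']
      · simp [h]
    · intro m hm hk
      rcases List.mem_cons.mp hm with rfl | hm
      · have : m ∈ stepA kartta kirjain acc m := by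
          unfold stepA; split_ifs <;> simp_all
        exact ihp.subset this
      · exact ihc m hm hk

-- a region is closed when every in-bounds same-letter neighbour of a member is a member
def RClosed (kartta : List (List String)) (kirjain : Option String)
    (R : List (Int × Int)) : Prop :=
  ∀ p ∈ R, ∀ q ∈ ruudunNaapurit p kartta, kirjainRuudussa q kartta = kirjain → q ∈ R

-- big invariant of one pass of A's inner loop
lemma alueForA_spec (kartta : List (List String)) (kirjain : Option String) :
    ∀ (alue : List (Int × Int)) (i : Nat),
      alue.Nodup → (∀ p ∈ alue, p ∈ pvCoords kartta) →
      (∀ p ∈ alue.take i, ∀ q ∈ ruudunNaapurit p kartta,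
          kirjainRuudussa q kartta = kirjain → q ∈ alue) →
      alue <+: alueForA kartta kirjain alue i ∧
      (alueForA kartta kirjain alue i).Nodup ∧
      (∀ p ∈ alueForA kartta kirjain alue i, p ∈ pvCoords kartta) ∧
      RClosed kartta kirjain (alueForA kartta kirjain alue i) := by
  intro alue i
  fun_induction alueForA kartta kirjain alue i with
  | case1 alue i h vk alue' ih =>
    intro hnd hsub hpre
    obtain ⟨hp, hn, hs, hc⟩ := foldA_all kartta kirjain (ruudunNaapurit vk kartta) alue
    rw [show (ruudunNaapurit vk kartta).foldl (stepA kartta kirjain) alue = alue' from rfl]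
      at hp hn hs hc
    have hnsub : ∀ n ∈ ruudunNaapurit vk kartta, n ∈ pvCoords kartta := by
      intro n hn'
      rw [mem_pvCoords_iff]
      exact (List.mem_filter.mp hn').2
    have hnd' : alue'.Nodup := hn hnd
    have hsub' : ∀ p ∈ alue', p ∈ pvCoords kartta := by
      intro p hp'
      rcases hs p hp' with h' | h'
      · exact hsub p h'
      · exact hnsub p h'
    have hvk : vk = alue[i]'h.1 := by
      show alue.getD i (0, 0) = _
      rw [List.getD_eq_getElem _ _ h.1]
    have htake : List.take (i + 1) alue' = List.take i alue ++ [alue[i]'h.1] := by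
      obtain ⟨t, ht⟩ := hp
      rw [← ht, List.take_append_of_le_length (by omega), List.take_add_one]
      simp [List.getElem?_eq_getElem h.1]
    have hpre' : ∀ p ∈ List.take (i + 1) alue', ∀ q ∈ ruudunNaapurit p kartta,
        kirjainRuudussa q kartta = kirjain → q ∈ alue' := by
      intro p hp' q hq hk
      rw [htake] at hp'
      rcases List.mem_append.mp hp' with h' | h'
      · exact hp.subset (hpre p h' q hq hk)
      · simp only [List.mem_singleton] at h'
        subst h'
        exact hc q (by rwa [← hvk] at hq) hk
    obtain ⟨ihp, ihn, ihs, ihcl⟩ := ih hnd' hsub' hpre'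
    exact ⟨hp.trans ihp, ihn, ihs, ihcl⟩
  | case2 alue i h =>
    intro hnd hsub hpre
    have hlen : ¬ i < alue.length := fun hi => h ⟨hi, hnd, hsub⟩
    rw [List.take_of_length_le (by omega)] at hpre
    exact ⟨List.prefix_refl _, hnd, hsub, hpre⟩

-- a pass over a closed region adds nothing
lemma alueForA_closed_id (kartta : List (List String)) (kirjain : Option String) :
    ∀ (alue : List (Int × Int)) (i : Nat),
      RClosed kartta kirjain alue → alueForA kartta kirjain alue i = alue := by
  intro alue i
  fun_induction alueForA kartta kirjain alue i with
  | case1 alue i h vk alue' ih =>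
    intro hcl
    have hvk : vk ∈ alue := by
      show alue.getD i (0, 0) ∈ alue
      rw [List.getD_eq_getElem _ _ h.1]
      exact List.getElem_mem h.1
    have he : alue' = alue := by
      show (ruudunNaapurit vk kartta).foldl (stepA kartta kirjain) alue = alue
      have : ∀ ns acc, (∀ n ∈ ns, kirjainRuudussa n kartta = kirjain → n ∈ acc) →
          List.foldl (stepA kartta kirjain) acc ns = acc := by
        intro ns
        induction ns with
        | nil => intro acc _; rfl
        | cons n t iht =>
          intro acc hcov
          have : stepA kartta kirjain acc n = acc := by
            unfold stepA
            split_ifs with h1 h2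
            · rfl
            · rfl
            · exact absurd (hcov n (by simp) (by simpa using h2)) h1
          rw [List.foldl_cons, this]
          exact iht acc (fun m hm => hcov m (by simp [hm]))
      exact this _ _ (fun n hn hk => hcl vk hvk n hn hk)
    rw [he] at ih ⊢
    exact ih hcl
  | case2 alue i h =>
    intro _
    rfl

-- a second pass over a closed region confirms the length and the loop stops
lemma alueWhileA_closed (kartta : List (List String)) (kirjain : Option String)
    (R : List (Int × Int)) (hcl : RClosed kartta kirjain R) :
    alueWhileA kartta kirjain R = R := by
  rw [alueWhileA]
  simp only [alueForA_closed_id kartta kirjain R 0 hcl]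
  simp

-- the while loop terminates with the result of the first pass
lemma alueWhileA_eq (kartta : List (List String)) (kirjain : Option String)
    (alue : List (Int × Int)) (hnd : alue.Nodup) (hsub : ∀ p ∈ alue, p ∈ pvCoords kartta) :
    alueWhileA kartta kirjain alue = alueForA kartta kirjain alue 0 := by
  obtain ⟨hp, hn, hs, hcl⟩ := alueForA_spec kartta kirjain alue 0 hnd hsub (by simp)
  rw [alueWhileA]
  split_ifs with h1 h2
  · rfl
  · exact alueWhileA_closed kartta kirjain _ hcl
  · rfl

-- the body of B's neighbour loop, named for the lemmas (definitionally the lambda in bfsB)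
def stepB (kartta : List (List String)) (kirjain : Option String)
    (st : List (Int × Int) × PySem.Set (Int × Int)) (naapuri : Int × Int) :
    List (Int × Int) × PySem.Set (Int × Int) :=
  if naapuri ∈ st.2 then st
  else if 0 ≤ naapuri.1 ∧ naapuri.1 < (kartta.length : Int) ∧ 0 ≤ naapuri.2 ∧
      naapuri.2 < (((PySem.List.pyGet? kartta naapuri.1).getD []).length : Int) ∧
      ruutuB kartta naapuri.1 naapuri.2 = kirjain then
    (st.1 ++ [naapuri], PySem.Set.add st.2 naapuri)
  else st

-- B's test is A's rajoissa plus A's letter test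
lemma condB_iff (kartta : List (List String)) (kirjain : Option String) (n : Int × Int) :
    (0 ≤ n.1 ∧ n.1 < (kartta.length : Int) ∧ 0 ≤ n.2 ∧
      n.2 < (((PySem.List.pyGet? kartta n.1).getD []).length : Int) ∧
      ruutuB kartta n.1 n.2 = kirjain) ↔
    (rajoissa n kartta = true ∧ kirjainRuudussa n kartta = kirjain) := by
  have hr : ruutuB kartta n.1 n.2 = kirjainRuudussa n kartta := rfl
  rw [hr]
  unfold rajoissa
  constructor
  · rintro ⟨h1, h2, h3, h4, h5⟩
    refine ⟨?_, h5⟩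
    rw [if_neg (by omega), if_neg (by omega)]
  · rintro ⟨h, h5⟩
    split_ifs at h with h1 h2
    rw [not_or] at h1 h2
    exact ⟨by omega, by omega, by omega, by omega, h5⟩

-- B's neighbour loop on a (region, seen) pair with seen = region is A's neighbour loop twice over
lemma foldB_pair (kartta : List (List String)) (kirjain : Option String) :
    ∀ (ns acc : List (Int × Int)),
    ns.foldl (stepB kartta kirjain) (acc, acc) =
      ((ns.filter (fun r => rajoissa r kartta)).foldl (stepA kartta kirjain) acc,
       (ns.filter (fun r => rajoissa r kartta)).foldl (stepA kartta kirjain) acc) := by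
  intro ns
  induction ns with
  | nil => intro acc; rfl
  | cons n t ih =>
    intro acc
    have hstep : stepB kartta kirjain (acc, acc) n =
        ((if rajoissa n kartta then stepA kartta kirjain acc n else acc),
         (if rajoissa n kartta then stepA kartta kirjain acc n else acc)) := by
      by_cases hm : n ∈ acc
      · have hB : stepB kartta kirjain (acc, acc) n = (acc, acc) := by
          unfold stepB; exact if_pos hm
        have hA : stepA kartta kirjain acc n = acc := by
          unfold stepA; exact if_pos hm
        rw [hB, hA, ite_self]
      · by_cases hcnd : (0 ≤ n.1 ∧ n.1 < (kartta.length : Int) ∧ 0 ≤ n.2 ∧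
            n.2 < (((PySem.List.pyGet? kartta n.1).getD []).length : Int) ∧
            ruutuB kartta n.1 n.2 = kirjain)
        · obtain ⟨hb, hk⟩ := (condB_iff kartta kirjain n).mp hcnd
          have hB : stepB kartta kirjain (acc, acc) n = (acc ++ [n], PySem.Set.add acc n) := by
            unfold stepB; rw [if_neg hm, if_pos hcnd]
          have hA : stepA kartta kirjain acc n = acc ++ [n] := by
            unfold stepA; rw [if_neg hm, if_neg (by simp [hk])]
          rw [hB, hA, if_pos hb, PySem.Set.add_of_not_mem hm]
        · have hB : stepB kartta kirjain (acc, acc) n = (acc, acc) := by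
            unfold stepB; rw [if_neg hm, if_neg hcnd]
          rw [hB]
          by_cases hb : rajoissa n kartta
          · have hk : kirjainRuudussa n kartta ≠ kirjain :=
              fun hk => hcnd ((condB_iff kartta kirjain n).mpr ⟨hb, hk⟩)
            have hA : stepA kartta kirjain acc n = acc := by
              unfold stepA; rw [if_neg hm, if_pos hk]
            rw [if_pos hb, hA]
          · rw [if_neg hb]
    rw [List.foldl_cons, hstep, List.filter_cons]
    by_cases hb : rajoissa n kartta
    · rw [if_pos hb, if_pos (by simp [hb]), List.foldl_cons]
      exact ih (stepA kartta kirjain acc n)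
    · rw [if_neg hb, if_neg (by simpa using hb)]
      exact ih acc

-- one unfolding of alueForA when the loop guard holds
lemma alueForA_step (kartta : List (List String)) (kirjain : Option String)
    (alue : List (Int × Int)) (i : Nat)
    (h : i < alue.length ∧ alue.Nodup ∧ ∀ p ∈ alue, p ∈ pvCoords kartta) :
    alueForA kartta kirjain alue i =
      alueForA kartta kirjain
        ((ruudunNaapurit (alue.getD i (0, 0)) kartta).foldl (stepA kartta kirjain) alue)
        (i + 1) := by
  rw [alueForA, dif_pos h]
  rfl

-- B's BFS loop with seen-set equal to the region equals A's pass, and keeps them equal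
lemma bfsB_eq_alueForA (kartta : List (List String)) (kirjain : Option String) :
    ∀ (alue : List (Int × Int)) (nahdyt : PySem.Set (Int × Int)) (i : Nat),
      nahdyt = alue →
      bfsB kartta kirjain alue nahdyt i =
        (alueForA kartta kirjain alue i, alueForA kartta kirjain alue i) := by
  intro alue nahdyt i
  fun_induction bfsB kartta kirjain alue nahdyt i with
  | case1 =>
    rename_i aluex alue i h c st ih
    intro hset
    subst hset
    have hst : st = ((ruudunNaapurit (alue.getD i (0, 0)) kartta).foldl (stepA kartta kirjain) alue,
        (ruudunNaapurit (alue.getD i (0, 0)) kartta).foldl (stepA kartta kirjain) alue) := by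
      show [(c.1 + 1, c.2), (c.1 - 1, c.2), (c.1, c.2 + 1), (c.1, c.2 - 1)].foldl
        (stepB kartta kirjain) (alue, alue) = _
      rw [foldB_pair]
      rfl
    have hb := ih (by rw [hst])
    rw [hst] at hb
    rw [alueForA_step kartta kirjain alue i h, hst]
    exact hb
  | case2 =>
    rename_i aluex alue i h
    intro hset
    subst hset
    rw [alueForA, dif_neg h]

-- named forms of the two outer loops (definitionally the lambdas in the ports)
def cellA (kartta : List (List String)) (y : Nat) (acc : List (List (Int × Int))) (x : Nat) :
    List (List (Int × Int)) :=
  if acc.any (fun alue => decide (((y : Int), (x : Int)) ∈ alue)) then acc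
  else acc ++ [alueRuudusta ((y : Int), (x : Int)) kartta]

def rowA (kartta : List (List String)) (acc : List (List (Int × Int))) (y : Nat) :
    List (List (Int × Int)) :=
  (List.range (kartta.getD y []).length).foldl (cellA kartta y) acc

def cellB (kartta : List (List String)) (y : Nat)
    (st : List (List (Int × Int)) × PySem.Set (Int × Int)) (x : Nat) :
    List (List (Int × Int)) × PySem.Set (Int × Int) :=
  if ((y : Int), (x : Int)) ∈ st.2 then st
  else
    let kirjain := ruutuB kartta (y : Int) (x : Int)
    let r := bfsB kartta kirjain [((y : Int), (x : Int))]
      (PySem.Set.ofList [((y : Int), (x : Int))]) 0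
    (st.1 ++ [r.1], PySem.Set.union st.2 r.2)

def rowB (kartta : List (List String)) (st : List (List (Int × Int)) × PySem.Set (Int × Int))
    (y : Nat) : List (List (Int × Int)) × PySem.Set (Int × Int) :=
  (List.range (kartta.getD y []).length).foldl (cellB kartta y) st

-- B's set of assigned cells is the union of the regions collected so far, and the region lists agree
def OuterInv (accA : List (List (Int × Int)))
    (st : List (List (Int × Int)) × PySem.Set (Int × Int)) : Prop :=
  st.1 = accA ∧ ∀ c : Int × Int, c ∈ st.2 ↔ ∃ r ∈ accA, c ∈ r

lemma cell_inv (kartta : List (List String)) (y x : Nat)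
    (hx : ((y : Int), (x : Int)) ∈ pvCoords kartta)
    (accA : List (List (Int × Int))) (st : List (List (Int × Int)) × PySem.Set (Int × Int))
    (hinv : OuterInv accA st) : OuterInv (cellA kartta y accA x) (cellB kartta y st x) := by
  obtain ⟨h1, h2⟩ := hinv
  by_cases hm : ((y : Int), (x : Int)) ∈ st.2
  · have hany : accA.any (fun alue => decide (((y : Int), (x : Int)) ∈ alue)) = true := by
      rw [List.any_eq_true]
      obtain ⟨r, hr, hcr⟩ := (h2 _).mp hm
      exact ⟨r, hr, by simpa using hcr⟩
    unfold cellA cellB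
    rw [if_pos hm, if_pos hany]
    exact ⟨h1, h2⟩
  · have hany : accA.any (fun alue => decide (((y : Int), (x : Int)) ∈ alue)) = false := by
      rw [← Bool.not_eq_true, List.any_eq_true]
      rintro ⟨r, hr, hcr⟩
      exact hm ((h2 _).mpr ⟨r, hr, by simpa using hcr⟩)
    have hofl : PySem.Set.ofList [((y : Int), (x : Int))] = [((y : Int), (x : Int))] :=
      PySem.Set.ofList_eq_self_of_nodup [((y : Int), (x : Int))] (List.nodup_singleton _)
    have hreg : bfsB kartta (ruutuB kartta (y : Int) (x : Int)) [((y : Int), (x : Int))]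
        (PySem.Set.ofList [((y : Int), (x : Int))]) 0 =
        (alueForA kartta (kirjainRuudussa ((y : Int), (x : Int)) kartta) [((y : Int), (x : Int))] 0,
         alueForA kartta (kirjainRuudussa ((y : Int), (x : Int)) kartta) [((y : Int), (x : Int))] 0) := by
      rw [hofl]
      exact bfsB_eq_alueForA kartta _ _ _ 0 rfl
    have hregA : alueRuudusta ((y : Int), (x : Int)) kartta =
        alueForA kartta (kirjainRuudussa ((y : Int), (x : Int)) kartta) [((y : Int), (x : Int))] 0 :=
      alueWhileA_eq kartta _ _ (by simp) (by simpa using hx)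
    unfold cellA cellB
    rw [if_neg hm, hany]
    simp only [Bool.false_eq_true, if_false]
    refine ⟨?_, ?_⟩
    · show st.1 ++ _ = accA ++ _
      rw [h1, hreg, hregA]
    · intro c
      show c ∈ PySem.Set.union st.2 _ ↔ _
      rw [PySem.Set.mem_union, hreg]
      constructor
      · rintro (hc | hc)
        · obtain ⟨r, hr, hcr⟩ := (h2 c).mp hc
          exact ⟨r, by simp [hr], hcr⟩
        · refine ⟨alueRuudusta ((y : Int), (x : Int)) kartta, by simp, ?_⟩
          rw [hregA]
          simpa using hc
      · rintro ⟨r, hr, hcr⟩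
        rcases List.mem_append.mp hr with hr | hr
        · exact Or.inl ((h2 c).mpr ⟨r, hr, hcr⟩)
        · simp only [List.mem_singleton] at hr
          subst hr
          right
          simpa [hregA] using hcr

lemma row_inv (kartta : List (List String)) (y : Nat) (hy : y < kartta.length) :
    ∀ (accA : List (List (Int × Int))) (st : List (List (Int × Int)) × PySem.Set (Int × Int)),
    OuterInv accA st → OuterInv (rowA kartta accA y) (rowB kartta st y) := by
  unfold rowA rowB
  have hall : ∀ (xs : List Nat), (∀ x ∈ xs, ((y : Int), (x : Int)) ∈ pvCoords kartta) →
      ∀ accA st, OuterInv accA st →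
      OuterInv (xs.foldl (cellA kartta y) accA) (xs.foldl (cellB kartta y) st) := by
    intro xs
    induction xs with
    | nil => exact fun _ _ _ h => h
    | cons a t ih =>
      intro hxs accA st h
      exact ih (fun x hx => hxs x (List.mem_cons_of_mem a hx)) _ _
        (cell_inv kartta y a (hxs a List.mem_cons_self) accA st h)
  intro accA st h
  refine hall _ ?_ accA st h
  intro x hx
  simp only [List.mem_range] at hx
  simp only [pvCoords, List.mem_flatMap]
  refine ⟨y, List.mem_range.mpr hy, ?_⟩
  simp only [List.mem_map, List.mem_range]
  exact ⟨x, hx, rfl⟩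

lemma outer_inv (kartta : List (List String)) :
    OuterInv ((List.range kartta.length).foldl (rowA kartta) [])
      ((List.range kartta.length).foldl (rowB kartta) ([], PySem.Set.empty)) := by
  have hall : ∀ (ys : List Nat), (∀ y ∈ ys, y < kartta.length) →
      ∀ accA st, OuterInv accA st →
      OuterInv (ys.foldl (rowA kartta) accA) (ys.foldl (rowB kartta) st) := by
    intro ys
    induction ys with
    | nil => exact fun _ _ _ h => h
    | cons a t ih =>
      intro hys accA st h
      exact ih (fun y hy => hys y (List.mem_cons_of_mem a hy)) _ _
        (row_inv kartta a (hys a List.mem_cons_self) accA st h)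
  refine hall _ (fun y hy => List.mem_range.mp hy) [] ([], PySem.Set.empty) ⟨rfl, ?_⟩
  intro c
  simp [PySem.Set.empty]

-- ===== VERDICT (by name: the statement is the Claim_ definition above) =====
theorem luo_alueet_spec : Claim_equal_luo_alueet := by
  intro kartta _
  unfold Spec_luo_alueet
  have h := (outer_inv kartta).1
  have e1 : luo_alueet kartta = (List.range kartta.length).foldl (rowA kartta) [] := by
    unfold luo_alueet rowA cellA
    rfl
  have e2 : luo_alueet_alt kartta =
      ((List.range kartta.length).foldl (rowB kartta) ([], PySem.Set.empty)).1 := by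
    unfold luo_alueet_alt rowB cellB
    rfl
  rw [e1, e2]
  exact h.symm
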